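-- pv_equiv track=rewrite | github.com/Hamiltonxx/pyalgorithms | algorithmic_thinking_puzzles/bitwise/problems.py | indexof0
-- ===== SOURCE A (Python) =====
-- def indexof0(b):
--     b.append(0)
--     mxidx = 0
--     mx = 1
--     pre = prepre = -1
--     for i,x in enumerate(b):
--         if x == 0:
--             if i - prepre - 1 > mx:
--                 mx = i - prepre - 1
--                 mxidx = pre
--             prepre = pre
--             pre = i
--     return mxidx
-- ===== SOURCE B (Python) =====
-- def indexof0(b):
--     b.append(0)
--     # Pass 1: run-length encode — lengths of maximal nonzero runs before each zero.
--     runs = []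
--     run = 0
--     for x in b:
--         if x == 0:
--             runs.append(run)
--             run = 0
--         else:
--             run += 1
--     # Pass 2: stream over run lengths; the gap around a zero is the sum of the
--     # runs on either side plus one. prev=-1 acts as the run before a virtual
--     # zero at index -1; pos tracks the index of the zero preceding current run.
--     mx, mxidx = 1, 0
--     pos, prev = -1, -1
--     for s in runs:
--         gap = prev + s + 1
--         if gap > mx:
--             mx, mxidx = gap, pos
--         pos += s + 1
--         prev = s
--     return mxidx
-- ===== Notes on version B (the rewrite author's own statement) =====
-- stated objective: alternative
-- what changed: B never tracks zero indices: it run-length encodes the list into lengths of nonzero runs, then streams over those run lengths, computing each gap as the sum of two adjacent run lengths plus one and recovering the answer index from a running position counter.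
import Mathlib
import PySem

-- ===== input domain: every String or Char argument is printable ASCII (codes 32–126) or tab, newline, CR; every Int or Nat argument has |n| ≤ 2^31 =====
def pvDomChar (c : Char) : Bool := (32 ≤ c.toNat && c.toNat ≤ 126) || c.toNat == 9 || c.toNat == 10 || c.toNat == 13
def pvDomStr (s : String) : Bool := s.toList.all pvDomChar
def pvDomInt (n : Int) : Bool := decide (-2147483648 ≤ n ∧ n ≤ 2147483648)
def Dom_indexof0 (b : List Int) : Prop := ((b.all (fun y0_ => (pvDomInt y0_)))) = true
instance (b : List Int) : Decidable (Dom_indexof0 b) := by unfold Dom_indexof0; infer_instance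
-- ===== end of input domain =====

-- B replaces A's zero-index tracking with a run-length encoding of the nonzero runs and a
-- stream over run lengths (gap = sum of two adjacent runs + 1); same O(n) cost, equal returns.
-- Both Pythons mutate b in place (append 0); the equivalence proved here is about the return value.

-- ===== PORT A =====
def indexof0 (b : List Int) : Int :=
  let b2 := b ++ [0]                      -- b.append(0)
  let st := (PySem.List.enumerate b2 0).foldl
    (fun (st : Int × Int × Int × Int) (p : Int × Int) =>
      if p.2 == 0 then
        (match st with
         | (mxidx, mx, pre, prepre) =>
           let q : Int × Int :=
             if p.1 - prepre - 1 > mx then (pre, p.1 - prepre - 1) else (mxidx, mx)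
           (q.1, q.2, p.1, pre))
      else st)
    (0, 1, -1, -1)                        -- mxidx = 0, mx = 1, pre = prepre = -1
  st.1

-- ===== PORT B =====
-- body of B's first loop: run-length encode (append finished run on a zero)
def pvRLEStep (st : List Int × Int) (x : Int) : List Int × Int :=
  if x == 0 then (st.1 ++ [st.2], 0) else (st.1, st.2 + 1)

-- body of B's second loop over run lengths; state (mx, mxidx, pos, prev)
def pvGapStep (st : Int × Int × Int × Int) (s : Int) : Int × Int × Int × Int :=
  match st with
  | (mx, mxidx, pos, prev) =>
    let gap := prev + s + 1
    let q : Int × Int := if gap > mx then (gap, pos) else (mx, mxidx)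
    (q.1, q.2, pos + s + 1, s)

def indexof0_alt (b : List Int) : Int :=
  let b2 := b ++ [0]                      -- b.append(0)
  let runs := (b2.foldl pvRLEStep ([], 0)).1
  let st := runs.foldl pvGapStep (1, 0, -1, -1)   -- mx=1, mxidx=0, pos=-1, prev=-1
  st.2.1

-- ===== PRECONDITION & SPEC =====
def Spec_indexof0 (b : List Int) (out : Int) : Prop := out = indexof0_alt b
instance (b : List Int) (out : Int) : Decidable (Spec_indexof0 b out) := by unfold Spec_indexof0; infer_instance

-- ===== CLAIM =====
def Claim_equal_indexof0 : Prop := ∀ (b : List Int), Dom_indexof0 b → Spec_indexof0 b (indexof0 b)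

-- ===== LEMMAS AND PROOFS =====

-- the RLE fold only appends to its accumulator
theorem pvRLE_append (l : List Int) : ∀ (acc : List Int) (run : Int),
    l.foldl pvRLEStep (acc, run)
      = (acc ++ (l.foldl pvRLEStep ([], run)).1, (l.foldl pvRLEStep ([], run)).2) := by
  induction l with
  | nil => intro acc run; simp
  | cons x tl ih =>
    intro acc run
    simp only [List.foldl_cons, pvRLEStep]
    by_cases h : (x == 0) = true
    · rw [if_pos h, if_pos h]
      simp only [List.nil_append]
      rw [ih ([run]) 0, ih (acc ++ [run]) 0]
      simp
    · rw [if_neg h, if_neg h]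
      exact ih acc (run + 1)

-- main invariant: A's stream from index i with state (mxidx, mx, pos, pos-prev-1) equals
-- B's two-stage computation resumed with current run r, where pos = i - r - 1
theorem pvMain (l : List Int) : ∀ (i r mxidx mx pos prev : Int), pos = i - r - 1 →
    ((PySem.List.enumerate l i).foldl
      (fun (st : Int × Int × Int × Int) (p : Int × Int) =>
        if p.2 == 0 then
          (match st with
           | (mxidx, mx, pre, prepre) =>
             let q : Int × Int :=
               if p.1 - prepre - 1 > mx then (pre, p.1 - prepre - 1) else (mxidx, mx)
             (q.1, q.2, p.1, pre))
        else st)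
      (mxidx, mx, pos, pos - prev - 1)).1
    = (((l.foldl pvRLEStep ([], r)).1).foldl pvGapStep (mx, mxidx, pos, prev)).2.1 := by
  induction l with
  | nil => intro i r mxidx mx pos prev _; simp [PySem.List.enumerate]
  | cons x tl ih =>
    intro i r mxidx mx pos prev hpos
    subst hpos
    rw [PySem.List.enumerate_cons]
    simp only [List.foldl_cons, pvRLEStep]
    by_cases h : (x == 0) = true
    · rw [if_pos h, if_pos h]
      simp only [List.nil_append]
      rw [pvRLE_append tl [r] 0]
      simp only [List.cons_append, List.nil_append, List.foldl_cons, pvGapStep]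
      have e1 : i - (i - r - 1 - prev - 1) - 1 = prev + r + 1 := by omega
      rw [e1]
      have e2 : i - r - 1 + r + 1 = i := by omega
      by_cases hg : prev + r + 1 > mx
      · rw [if_pos hg, if_pos hg, e2]
        exact ih (i + 1) 0 (i - r - 1) (prev + r + 1) i r (by omega)
      · rw [if_neg hg, if_neg hg, e2]
        exact ih (i + 1) 0 mxidx mx i r (by omega)
    · rw [if_neg h, if_neg h]
      have e3 : i - r - 1 = i + 1 - (r + 1) - 1 := by omega
      rw [e3]
      exact ih (i + 1) (r + 1) mxidx mx (i + 1 - (r + 1) - 1) prev rfl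

-- ===== VERDICT =====
theorem indexof0_spec : Claim_equal_indexof0 := by
  intro b _
  show indexof0 b = indexof0_alt b
  simp only [indexof0, indexof0_alt]
  exact pvMain (b ++ [0]) 0 0 0 1 (-1) (-1) (by omega)
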